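-- pv_equiv track=rewrite | github.com/Areen-09/bajaj_oa | main.py | categorize_input_data
-- ===== SOURCE A (Python) =====
-- from typing import List, Union, Dict
--
-- def categorize_input_data(input_array: List[Union[str, int, float]]) -> Dict:
--     odd_numbers = []
--     even_numbers = []
--     alphabets = []
--     special_characters = []
--
--     for item in input_array:
--         item_str = str(item)
--         if item_str.isdigit():
--             num = int(item_str)
--             if num % 2 == 0:
--                 even_numbers.append(item_str)
--             else:
--                 odd_numbers.append(item_str)
--         elif item_str.isalpha():
--             alphabets.append(item_str.upper())
--         else:
--             special_characters.append(item_str)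
--
--     return {
--         "odd_numbers": odd_numbers,
--         "even_numbers": even_numbers,
--         "alphabets": alphabets,
--         "special_characters": special_characters,
--     }
-- ===== SOURCE B (Python) =====
-- from typing import List, Union, Dict
--
-- def categorize_input_data(input_array: List[Union[str, int, float]]) -> Dict:
--     strs = [str(x) for x in input_array]
--     return {
--         "odd_numbers": [s for s in strs if s.isdigit() and int(s) % 2 == 1],
--         "even_numbers": [s for s in strs if s.isdigit() and int(s) % 2 == 0],
--         "alphabets": [s.upper() for s in strs if s.isalpha()],
--         "special_characters": [s for s in strs if not s.isdigit() and not s.isalpha()],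
--     }
-- ===== Notes on version B (the rewrite author's own statement) =====
-- stated objective: alternative
-- what changed: A distributes items into four bucket lists in one stateful loop; B builds each of the four output lists independently with its own filtered comprehension pass (no mutable buckets).
import Mathlib
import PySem

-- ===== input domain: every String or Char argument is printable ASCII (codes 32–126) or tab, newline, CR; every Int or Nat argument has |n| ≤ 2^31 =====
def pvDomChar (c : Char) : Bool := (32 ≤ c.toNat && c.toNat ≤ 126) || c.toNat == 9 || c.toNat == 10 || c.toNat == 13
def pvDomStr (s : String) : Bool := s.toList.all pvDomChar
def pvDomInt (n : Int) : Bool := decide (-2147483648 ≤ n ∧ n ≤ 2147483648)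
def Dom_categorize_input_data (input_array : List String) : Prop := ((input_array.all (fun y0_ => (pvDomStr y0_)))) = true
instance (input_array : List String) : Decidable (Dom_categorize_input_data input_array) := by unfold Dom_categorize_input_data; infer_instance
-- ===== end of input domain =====

-- B is an alternative decomposition: four independent filtered passes instead of A's single bucket-distributing loop.

-- ===== PORT A =====
-- one loop step: distribute `item` into the four running buckets (odd, even, alpha, special)
def catStepA (st : List String × List String × List String × List String) (item : String) :
    List String × List String × List String × List String :=
  let (o, e, a, s) := st
  if PySem.Str.strIsdigit item then
    -- int(item_str): cannot raise since item is all ASCII digits, `.getD 0` is unreachable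
    let num : Int := (PySem.Int.ofStr? item).getD 0
    if PySem.Int.mod num 2 = 0 then (o, e ++ [item], a, s) else (o ++ [item], e, a, s)
  else if PySem.Str.strIsalpha item then (o, e, a ++ [PySem.Str.upper item], s)
  else (o, e, a, s ++ [item])

def categorize_input_data (input_array : List String) : List (String × List String) :=
  let st := input_array.foldl catStepA ([], [], [], [])
  [("odd_numbers", st.1), ("even_numbers", st.2.1),
   ("alphabets", st.2.2.1), ("special_characters", st.2.2.2)]

-- ===== PORT B =====
-- four independent passes, one per bucket (Source B's comprehensions; str(x) is the identity here)
def categorize_input_data_alt (input_array : List String) : List (String × List String) :=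
  [("odd_numbers",
      input_array.filter (fun s => PySem.Str.strIsdigit s &&
        (PySem.Int.mod ((PySem.Int.ofStr? s).getD 0) 2 == 1))),
   ("even_numbers",
      input_array.filter (fun s => PySem.Str.strIsdigit s &&
        (PySem.Int.mod ((PySem.Int.ofStr? s).getD 0) 2 == 0))),
   ("alphabets",
      (input_array.filter (fun s => PySem.Str.strIsalpha s)).map PySem.Str.upper),
   ("special_characters",
      input_array.filter (fun s => !PySem.Str.strIsdigit s && !PySem.Str.strIsalpha s))]

-- ===== PRECONDITION & SPEC =====
def Spec_categorize_input_data (input_array : List String) (out : List (String × List String)) : Prop := out = categorize_input_data_alt input_array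
instance (input_array : List String) (out : List (String × List String)) : Decidable (Spec_categorize_input_data input_array out) := by unfold Spec_categorize_input_data; infer_instance

-- ===== CLAIM (what is proved, stated in full; the proofs are below) =====
def Claim_equal_categorize_input_data : Prop := ∀ (input_array : List String), Dom_categorize_input_data input_array → Spec_categorize_input_data input_array (categorize_input_data input_array)

-- ===== LEMMAS AND PROOFS =====

theorem char_digit_not_alpha (c : Char) (hd : PySem.Chars.isdigit c = true) :
    PySem.Chars.isalpha c = false := by
  simp only [PySem.Chars.isdigit, PySem.Chars.isalpha, PySem.Chars.isupper, PySem.Chars.islower,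
    Bool.and_eq_true, decide_eq_true_eq, Char.le_def, UInt32.le_iff_toNat_le] at hd ⊢
  simp only [Bool.or_eq_false_iff, Bool.and_eq_false_iff, decide_eq_false_iff_not, not_le]
  have h0 : '0'.val.toNat = 48 := rfl
  have h9 : '9'.val.toNat = 57 := rfl
  have hA : 'A'.val.toNat = 65 := rfl
  have hZ : 'Z'.val.toNat = 90 := rfl
  have ha : 'a'.val.toNat = 97 := rfl
  have hz : 'z'.val.toNat = 122 := rfl
  omega

theorem not_isalpha_of_isdigit (s : String) (h : PySem.Str.strIsdigit s = true) :
    PySem.Str.strIsalpha s = false := by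
  simp only [PySem.Str.strIsdigit_eq, PySem.Str.strIsalpha_eq,
    PySem.Chars.strIsdigit, PySem.Chars.strIsalpha, Bool.and_eq_true, List.all_eq_true] at h ⊢
  cases hl : s.toList with
  | nil => rw [hl] at h; simp at h
  | cons c cs =>
    rw [hl] at h
    have hc := char_digit_not_alpha c (h.2 c (by simp))
    simp [hc]

theorem foldl_catStepA (l : List String) (o e a s : List String) :
    l.foldl catStepA (o, e, a, s) =
      (o ++ l.filter (fun s => PySem.Str.strIsdigit s &&
            (PySem.Int.mod ((PySem.Int.ofStr? s).getD 0) 2 == 1)),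
       e ++ l.filter (fun s => PySem.Str.strIsdigit s &&
            (PySem.Int.mod ((PySem.Int.ofStr? s).getD 0) 2 == 0)),
       a ++ (l.filter (fun s => PySem.Str.strIsalpha s)).map PySem.Str.upper,
       s ++ l.filter (fun s => !PySem.Str.strIsdigit s && !PySem.Str.strIsalpha s)) := by
  induction l generalizing o e a s with
  | nil => simp
  | cons x xs ih =>
    cases hd : PySem.Str.strIsdigit x with
    | true =>
      have ha := not_isalpha_of_isdigit x hd
      rw [PySem.Str.strIsdigit_eq] at hd
      rw [PySem.Str.strIsalpha_eq] at ha
      rcases PySem.Int.mod_two_eq ((PySem.Int.ofStr? x).getD 0) with hm | hm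
      · have hm' : (PySem.Int.ofStr? x).getD 0 % 2 = 0 := by
          rw [← PySem.Int.mod_eq_emod_of_pos (by omega : (0:Int) < 2)]; exact hm
        simp [catStepA, hd, ha, hm', ih]
      · have hm' : (PySem.Int.ofStr? x).getD 0 % 2 = 1 := by
          rw [← PySem.Int.mod_eq_emod_of_pos (by omega : (0:Int) < 2)]; exact hm
        simp [catStepA, hd, ha, hm', ih]
    | false =>
      rw [PySem.Str.strIsdigit_eq] at hd
      cases hA : PySem.Str.strIsalpha x <;> rw [PySem.Str.strIsalpha_eq] at hA <;>
        simp [catStepA, hd, hA, ih]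

-- ===== VERDICT (by name: the statement is the Claim_ definition above) =====
theorem categorize_input_data_spec : Claim_equal_categorize_input_data := by
  intro input_array _
  unfold Spec_categorize_input_data categorize_input_data categorize_input_data_alt
  simp [foldl_catStepA]
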